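-- pv_equiv track=rewrite | github.com/Udit21Ag/vlm-navigation-assistant | caption/rule_based_caption.py | generate
-- ===== SOURCE A (Python) =====
-- def generate(detections):
--     hazards = ["car", "bus", "truck", "motorcycle"]
--
--     hazard_objects = [
--         obj for obj in detections if obj["label"] in hazards
--     ]
--
--     if not hazard_objects:
--         return "Path appears clear."
--
--     # Sort by proximity (very close > near > far)
--     priority = {"very close": 3, "near": 2, "far": 1}
--     hazard_objects.sort(
--         key=lambda x: priority[x["distance"]], reverse=True
--     )
--
--     # Remove duplicates by label + direction
--     seen = set()
--     messages = []
--
--     for obj in hazard_objects: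
--         key = (obj["label"], obj["direction"])
--         if key in seen:
--             continue
--         seen.add(key)
--
--         label = obj["label"]
--         direction = obj["direction"]
--         distance = obj["distance"]
--
--         messages.append(
--             f"{label} {distance} on your {direction}"
--         )
--
--     # Only mention top 2 hazards to avoid clutter
--     messages = messages[:2]
--
--     return ". ".join(messages) + "."
-- ===== SOURCE B (Python) =====
-- def generate(detections):
--     hazards = {"car", "bus", "truck", "motorcycle"}
--     rank = {"very close": 0, "near": 1, "far": 2}
--
--     # One pass: drop each hazard into its distance bucket (no sort).
--     buckets = ([], [], [])
--     for obj in detections: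
--         if obj["label"] in hazards:
--             buckets[rank[obj["distance"]]].append(obj)
--
--     if not any(buckets):
--         return "Path appears clear."
--
--     # Dedup by (label, direction), stop as soon as two messages exist.
--     seen = set()
--     messages = []
--     for obj in buckets[0] + buckets[1] + buckets[2]:
--         key = (obj["label"], obj["direction"])
--         if key not in seen:
--             seen.add(key)
--             messages.append(
--                 f"{obj['label']} {obj['distance']} on your {obj['direction']}"
--             )
--             if len(messages) == 2:
--                 break
--
--     return ". ".join(messages) + "."
-- ===== Notes on version B (the rewrite author's own statement) =====
-- stated objective: alternative
-- what changed: Replaces the comparison sort by a single bucketing pass over the detections (three priority buckets concatenated in order, which reproduces the stable descending sort) and replaces dedup-then-truncate by a dedup loop that stops as soon as two messages are collected.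
import Mathlib
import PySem

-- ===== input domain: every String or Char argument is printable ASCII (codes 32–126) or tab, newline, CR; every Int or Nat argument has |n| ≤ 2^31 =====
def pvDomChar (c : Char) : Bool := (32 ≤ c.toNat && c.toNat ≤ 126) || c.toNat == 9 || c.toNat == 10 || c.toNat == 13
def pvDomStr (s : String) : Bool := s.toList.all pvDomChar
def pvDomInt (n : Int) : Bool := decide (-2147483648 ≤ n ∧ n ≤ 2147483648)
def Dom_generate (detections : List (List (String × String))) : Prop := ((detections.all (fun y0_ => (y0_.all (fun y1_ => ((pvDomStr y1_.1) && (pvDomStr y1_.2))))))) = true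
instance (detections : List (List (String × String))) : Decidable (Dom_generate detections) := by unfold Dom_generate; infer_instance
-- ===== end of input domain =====

-- B replaces the stable descending sort by one bucketing pass (three priority buckets,
-- concatenated) and stops the dedup loop as soon as two messages are collected.

-- ===== PORT A =====
-- shared accessors: dict field lookups (first match; Pre_ guarantees the keys exist where read)
def pvLabel (o : List (String × String)) : String := (List.lookup "label" o).getD ""
def pvDist (o : List (String × String)) : String := (List.lookup "distance" o).getD ""
def pvDir (o : List (String × String)) : String := (List.lookup "direction" o).getD ""
def pvHazards : List String := ["car", "bus", "truck", "motorcycle"]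
def pvIsHaz (o : List (String × String)) : Bool := pvHazards.contains (pvLabel o)
-- f"{label} {distance} on your {direction}"
def pvMsg (o : List (String × String)) : String :=
  pvLabel o ++ " " ++ pvDist o ++ " on your " ++ pvDir o
-- priority[x["distance"]] (KeyError for any other distance: excluded by Pre_)
def pvPrio (o : List (String × String)) : Int :=
  if pvDist o = "very close" then 3
  else if pvDist o = "near" then 2
  else if pvDist o = "far" then 1
  else 0
-- body of A's dedup loop: state = (seen, messages)
def pvStepA (st : PySem.Set (String × String) × List String) (o : List (String × String)) :
    PySem.Set (String × String) × List String :=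
  let key := (pvLabel o, pvDir o)
  if PySem.Set.contains st.1 key then st
  else (PySem.Set.add st.1 key, st.2 ++ [pvMsg o])

def generate (detections : List (List (String × String))) : String :=
  let hazard_objects := detections.filter (fun o => pvIsHaz o)
  if hazard_objects.isEmpty then "Path appears clear."
  else
    let sortedH := PySem.List.sorted hazard_objects pvPrio true
    let st := sortedH.foldl pvStepA ([], [])
    let messages := st.2.take 2
    PySem.Str.join ". " messages ++ "."

-- ===== PORT B =====
-- body of B's bucketing loop: state = (bucket "very close", bucket "near", bucket "far")
def pvStepB (b : List (List (String × String)) × List (List (String × String)) × List (List (String × String)))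
    (o : List (String × String)) :
    List (List (String × String)) × List (List (String × String)) × List (List (String × String)) :=
  if pvIsHaz o then
    if pvDist o = "very close" then (b.1 ++ [o], b.2.1, b.2.2)
    else if pvDist o = "near" then (b.1, b.2.1 ++ [o], b.2.2)
    else (b.1, b.2.1, b.2.2 ++ [o])
  else b
-- B's dedup loop with early stop at two messages
def pvCollect : List (List (String × String)) → PySem.Set (String × String) → List String → List String
  | [], _, msgs => msgs
  | o :: rest, seen, msgs =>
    let key := (pvLabel o, pvDir o)
    if PySem.Set.contains seen key then pvCollect rest seen msgs
    else
      let msgs' := msgs ++ [pvMsg o]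
      if msgs'.length == 2 then msgs' else pvCollect rest (PySem.Set.add seen key) msgs'

def generate_alt (detections : List (List (String × String))) : String :=
  let b := detections.foldl pvStepB ([], [], [])
  if b.1.isEmpty && b.2.1.isEmpty && b.2.2.isEmpty then "Path appears clear."
  else PySem.Str.join ". " (pvCollect (b.1 ++ b.2.1 ++ b.2.2) [] []) ++ "."

-- ===== PRECONDITION & SPEC =====
-- Pre_ excludes exactly the inputs on which A raises KeyError: an object without a "label"
-- key, or a hazard object whose "distance" is not one of the three known values or which
-- has no "direction" key.
def Pre_generate (detections : List (List (String × String))) : Prop :=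
  ∀ o ∈ detections, (List.lookup "label" o).isSome ∧
    (pvIsHaz o = true →
      ((List.lookup "distance" o = some "very close" ∨ List.lookup "distance" o = some "near" ∨
        List.lookup "distance" o = some "far") ∧
       (List.lookup "direction" o).isSome))
instance (detections : List (List (String × String))) : Decidable (Pre_generate detections) := by
  unfold Pre_generate; infer_instance

def pvWitness_generate : (List (List (String × String))) :=
  [[("label", "car"), ("distance", "near"), ("direction", "left")],
   [("label", "dog"), ("distance", "odd")]]

def Spec_generate (detections : List (List (String × String))) (out : String) : Prop := out = generate_alt detections
instance (detections : List (List (String × String))) (out : String) : Decidable (Spec_generate detections out) := by unfold Spec_generate; infer_instance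

-- ===== CLAIM (what is proved, stated in full; the proofs are below) =====
def Claim_equal_generate : Prop := ∀ (detections : List (List (String × String))), Dom_generate detections → Pre_generate detections → Spec_generate detections (generate detections)

-- ===== LEMMAS AND PROOFS =====
-- bucket predicates (as B's loop tests them)
def pF3 (o : List (String × String)) : Bool := pvIsHaz o && decide (pvDist o = "very close")
def pF2 (o : List (String × String)) : Bool := pvIsHaz o && decide (pvDist o = "near")
def pF1e (o : List (String × String)) : Bool :=
  pvIsHaz o && !decide (pvDist o = "very close") && !decide (pvDist o = "near")
-- priority-value predicate (as A's sort orders by)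
def pQ (k : Int) (o : List (String × String)) : Bool := decide (pvPrio o = k)

lemma pv_foldlB (l : List (List (String × String)))
    (b : List (List (String × String)) × List (List (String × String)) × List (List (String × String))) :
    l.foldl pvStepB b = (b.1 ++ l.filter pF3, b.2.1 ++ l.filter pF2, b.2.2 ++ l.filter pF1e) := by
  induction l generalizing b with
  | nil => simp
  | cons o t ih =>
    rw [List.foldl_cons, ih]
    by_cases hh : pvIsHaz o = true
    · by_cases h3 : pvDist o = "very close"
      · simp [pvStepB, hh, h3, pF3, pF2, pF1e]
      · by_cases h2 : pvDist o = "near"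
        · simp [pvStepB, hh, h2, pF3, pF2, pF1e]
        · simp [pvStepB, hh, h3, h2, pF3, pF2, pF1e]
    · simp [pvStepB, hh, pF3, pF2, pF1e]

lemma pv_insertBy_skip (p : List (String × String) → List (String × String) → Bool)
    (x : List (String × String)) (l1 l2 : List (List (String × String)))
    (h : ∀ y ∈ l1, p x y = false) :
    PySem.List.insertBy p x (l1 ++ l2) = l1 ++ PySem.List.insertBy p x l2 := by
  induction l1 with
  | nil => simp
  | cons y t ih =>
    have hy := h y (by simp)
    simp only [List.cons_append, PySem.List.insertBy, hy, Bool.false_eq_true, if_false]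
    rw [ih (fun z hz => h z (by simp [hz]))]

lemma pv_insertBy_front (p : List (String × String) → List (String × String) → Bool)
    (x : List (String × String)) (l : List (List (String × String)))
    (h : ∀ y ∈ l, p x y = true) :
    PySem.List.insertBy p x l = x :: l := by
  cases l with
  | nil => rfl
  | cons y t => simp [PySem.List.insertBy, h y (by simp)]

lemma pv_sorted_buckets (xs : List (List (String × String)))
    (h : ∀ o ∈ xs, pvPrio o = 3 ∨ pvPrio o = 2 ∨ pvPrio o = 1) :
    PySem.List.sorted xs pvPrio true =
      xs.filter (pQ 3) ++ xs.filter (pQ 2) ++ xs.filter (pQ 1) := by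
  rw [PySem.List.sorted_rev_eq_foldl_insertBy]
  induction xs using List.reverseRecOn with
  | nil => simp
  | append_singleton t x ih =>
    rw [List.foldl_append, List.foldl_cons, List.foldl_nil,
        ih (fun o ho => h o (by simp [ho]))]
    have hmem3 : ∀ y ∈ t.filter (pQ 3), pvPrio y = 3 := by
      intro y hy; have := (List.mem_filter.mp hy).2; simpa [pQ] using this
    have hmem2 : ∀ y ∈ t.filter (pQ 2), pvPrio y = 2 := by
      intro y hy; have := (List.mem_filter.mp hy).2; simpa [pQ] using this
    have hmem1 : ∀ y ∈ t.filter (pQ 1), pvPrio y = 1 := by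
      intro y hy; have := (List.mem_filter.mp hy).2; simpa [pQ] using this
    rcases h x (by simp) with h3 | h2 | h1
    · rw [List.append_assoc, pv_insertBy_skip _ _ _ _ (by intro y hy; simp [hmem3 y hy, h3])]
      rw [pv_insertBy_front _ _ _ (by
        intro y hy
        rcases List.mem_append.mp hy with hy2 | hy1
        · simp [hmem2 y hy2, h3]
        · simp [hmem1 y hy1, h3])]
      simp [List.filter_append, pQ, h3, List.append_assoc]
    · rw [pv_insertBy_skip _ _ _ _ (by
        intro y hy
        rcases List.mem_append.mp hy with hy3 | hy2
        · simp [hmem3 y hy3, h2]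
        · simp [hmem2 y hy2, h2])]
      rw [pv_insertBy_front _ _ _ (by intro y hy; simp [hmem1 y hy, h2])]
      simp [List.filter_append, pQ, h2, List.append_assoc]
    · rw [PySem.List.insertBy_of_forall_not_before _ _ _ (by
        intro y hy
        rcases List.mem_append.mp hy with hy' | hy1
        · rcases List.mem_append.mp hy' with hy3 | hy2
          · simp [hmem3 y hy3, h1]
          · simp [hmem2 y hy2, h1]
        · simp [hmem1 y hy1, h1])]
      simp [List.filter_append, pQ, h1, List.append_assoc]

lemma pv_stepA_append (l : List (List (String × String))) (seen : PySem.Set (String × String))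
    (msgs : List String) :
    (l.foldl pvStepA (seen, msgs)).2 = msgs ++ (l.foldl pvStepA (seen, [])).2 := by
  induction l generalizing seen msgs with
  | nil => simp
  | cons o t ih =>
    by_cases hc : PySem.Set.contains seen (pvLabel o, pvDir o) = true
    · simp only [List.foldl_cons, pvStepA, hc, if_true]
      exact ih seen msgs
    · simp only [List.foldl_cons, pvStepA, hc, Bool.false_eq_true, if_false]
      rw [ih _ (msgs ++ [pvMsg o]), ih _ ([] ++ [pvMsg o])]
      simp

lemma pv_collect_eq (l : List (List (String × String))) (seen : PySem.Set (String × String))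
    (msgs : List String) (h : msgs.length < 2) :
    pvCollect l seen msgs = (l.foldl pvStepA (seen, msgs)).2.take 2 := by
  induction l generalizing seen msgs with
  | nil =>
    simp only [pvCollect, List.foldl_nil]
    exact (List.take_of_length_le (by omega)).symm
  | cons o t ih =>
    by_cases hc : PySem.Set.contains seen (pvLabel o, pvDir o) = true
    · simp only [pvCollect, hc, if_true, List.foldl_cons, pvStepA]
      exact ih seen msgs h
    · by_cases h2 : (msgs ++ [pvMsg o]).length = 2
      · simp only [pvCollect, hc, Bool.false_eq_true, if_false, h2, beq_self_eq_true, if_true,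
          List.foldl_cons, pvStepA]
        rw [pv_stepA_append, List.take_append, h2]
        simp [List.take_of_length_le (le_of_eq h2)]
      · have hlt : (msgs ++ [pvMsg o]).length < 2 := by
          simp only [List.length_append, List.length_cons, List.length_nil] at h2 ⊢; omega
        simp only [pvCollect, hc, Bool.false_eq_true, if_false, List.foldl_cons, pvStepA]
        rw [if_neg (by simpa using h2)]
        exact ih _ _ hlt

-- the two bucket decompositions agree: B's detection-level filters are A's
-- priority-level filters of the hazard list
lemma pv_buckets_prio (detections : List (List (String × String)))
    (hpre : Pre_generate detections) :
    detections.filter pF3 = (detections.filter (fun o => pvIsHaz o)).filter (pQ 3) ∧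
    detections.filter pF2 = (detections.filter (fun o => pvIsHaz o)).filter (pQ 2) ∧
    detections.filter pF1e = (detections.filter (fun o => pvIsHaz o)).filter (pQ 1) := by
  refine ⟨?_, ?_, ?_⟩ <;>
  · rw [List.filter_filter]
    apply List.filter_congr
    intro o ho
    by_cases hh : pvIsHaz o = true
    · by_cases h3 : pvDist o = "very close"
      · simp [pF3, pF2, pF1e, pQ, pvPrio, hh, h3]
      · by_cases h2 : pvDist o = "near"
        · simp [pF3, pF2, pF1e, pQ, pvPrio, hh, h2]
        · have h1 : pvDist o = "far" := by
            rcases ((hpre o ho).2 hh).1 with hd | hd | hd <;>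
              simp only [pvDist, hd, Option.getD_some] at h3 h2 ⊢ <;> first | rfl | simp_all
          simp [pF3, pF2, pF1e, pQ, pvPrio, hh, h1]
    · simp [pF3, pF2, pF1e, pQ, hh]

lemma pv_prio_vals (detections : List (List (String × String)))
    (hpre : Pre_generate detections) :
    ∀ o ∈ detections.filter (fun o => pvIsHaz o), pvPrio o = 3 ∨ pvPrio o = 2 ∨ pvPrio o = 1 := by
  intro o ho
  rcases List.mem_filter.mp ho with ⟨hmem, hh⟩
  rcases ((hpre o hmem).2 hh).1 with hd | hd | hd <;>
    simp [pvPrio, pvDist, hd]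

-- ===== VERDICT (by name: the statement is the Claim_ definition above) =====
theorem generate_spec : Claim_equal_generate := by
  intro detections _ hpre
  unfold Spec_generate
  obtain ⟨e3, e2, e1⟩ := pv_buckets_prio detections hpre
  have hvals := pv_prio_vals detections hpre
  simp only [generate, generate_alt, pv_foldlB, List.nil_append, e3, e2, e1]
  set H := detections.filter (fun o => pvIsHaz o) with hH
  have hsort := pv_sorted_buckets H hvals
  have hperm : (H.filter (pQ 3) ++ H.filter (pQ 2) ++ H.filter (pQ 1)).Perm H := by
    rw [← hsort]; exact PySem.List.sorted_perm H pvPrio true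
  by_cases hE : H = []
  · simp [hE]
  · have hcne : H.filter (pQ 3) ++ H.filter (pQ 2) ++ H.filter (pQ 1) ≠ [] := by
      intro hc
      have hl := hperm.length_eq
      rw [hc] at hl
      exact hE (List.eq_nil_of_length_eq_zero hl.symm)
    rw [if_neg (by simp [List.isEmpty_iff, hE]), if_neg (by
      intro hall
      simp only [Bool.and_eq_true, List.isEmpty_iff] at hall
      exact hcne (by simp [hall.1.1, hall.1.2, hall.2]))]
    rw [pv_collect_eq _ _ _ (by decide), hsort]
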